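-- pv_equiv track=rewrite | github.com/r47717/PyLines | ballset.py | diag_coords
-- ===== SOURCE A (Python) =====
-- CELLS = 10
--
-- def diag_coords(n):
--     if n <= 2 * CELLS - 1: # up to down diags
--         i1 = 0 if n <= CELLS else n - CELLS
--         j1 = CELLS - n if n <= CELLS else 0
--         i2 = n - 1 if n <= CELLS else CELLS - 1
--         j2 = CELLS - 1 if n <= CELLS else (2*CELLS - 1) - n
--         result = [(i, j1 + (i - i1)) for i in range(i1, i2 + 1)]
--     else:  # down to up diags
--         n -= (2 * CELLS - 1)
--         i1 = 0 if n <= CELLS else n - CELLS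
--         j1 = n - 1 if n <= CELLS else CELLS - 1
--         i2 = n - 1 if n <= CELLS else CELLS - 1
--         j2 = i1 = 0 if n <= CELLS else n - CELLS
--         result = [(i, j1 - (i - i1)) for i in range(i1, i2 + 1)]
--     return result
-- ===== SOURCE B (Python) =====
-- CELLS = 10
--
-- def diag_coords(n):
--     result = []
--     for i in range(CELLS):
--         j = i + (CELLS - n) if n <= 2 * CELLS - 1 else (n - 2 * CELLS) - i
--         if 0 <= j < CELLS:
--             result.append((i, j))
--     return result
-- ===== Notes on version B (the rewrite author's own statement) =====
-- stated objective: simpler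
-- what changed: Replaces the four-way endpoint arithmetic (i1/j1/i2/j2 per branch) with a single scan of all rows i in range(CELLS), computing j from the diagonal invariant (j = i + (CELLS - n) or j = (n - 2*CELLS) - i) and keeping only in-bounds cells.
import Mathlib
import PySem

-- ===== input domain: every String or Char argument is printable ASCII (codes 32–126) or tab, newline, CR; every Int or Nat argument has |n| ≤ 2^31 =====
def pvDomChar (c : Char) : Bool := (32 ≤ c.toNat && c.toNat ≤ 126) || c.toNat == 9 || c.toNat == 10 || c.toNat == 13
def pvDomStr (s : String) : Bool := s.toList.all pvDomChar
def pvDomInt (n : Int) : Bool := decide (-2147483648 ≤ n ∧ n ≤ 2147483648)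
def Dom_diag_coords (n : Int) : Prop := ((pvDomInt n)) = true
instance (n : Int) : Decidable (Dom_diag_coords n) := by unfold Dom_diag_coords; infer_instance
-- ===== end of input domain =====

-- B replaces A's per-branch endpoint arithmetic with one scan over all rows,
-- computing the column from the diagonal invariant and filtering in-bounds cells (simpler).

-- ===== PORT A =====
def diag_coords (n : Int) : List (Int × Int) :=
  if n ≤ 2 * 10 - 1 then
    -- up to down diags
    let i1 : Int := if n ≤ 10 then 0 else n - 10
    let j1 : Int := if n ≤ 10 then 10 - n else 0
    let i2 : Int := if n ≤ 10 then n - 1 else 10 - 1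
    let _j2 : Int := if n ≤ 10 then 10 - 1 else (2 * 10 - 1) - n
    (PySem.List.pyRange i1 (i2 + 1) 1).map (fun i => (i, j1 + (i - i1)))
  else
    let m : Int := n - (2 * 10 - 1)   -- Python's 'n -= (2*CELLS - 1)'
    let j1 : Int := if m ≤ 10 then m - 1 else 10 - 1
    let i2 : Int := if m ≤ 10 then m - 1 else 10 - 1
    -- 'j2 = i1 = 0 if n <= CELLS else n - CELLS' reassigns i1 (to the same value)
    let i1 : Int := if m ≤ 10 then 0 else m - 10
    (PySem.List.pyRange i1 (i2 + 1) 1).map (fun i => (i, j1 - (i - i1)))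

-- ===== PORT B =====
def diag_coords_alt (n : Int) : List (Int × Int) :=
  (PySem.List.pyRange 0 10 1).foldl
    (fun result i =>
      let j : Int := if n ≤ 2 * 10 - 1 then i + (10 - n) else (n - 2 * 10) - i
      if 0 ≤ j ∧ j < 10 then result ++ [(i, j)] else result)
    []

-- ===== PRECONDITION & SPEC =====
def Spec_diag_coords (n : Int) (out : List (Int × Int)) : Prop := out = diag_coords_alt n
instance (n : Int) (out : List (Int × Int)) : Decidable (Spec_diag_coords n out) := by unfold Spec_diag_coords; infer_instance

-- ===== CLAIM (what is proved, stated in full; the proofs are below) =====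
def Claim_equal_diag_coords : Prop := ∀ (n : Int), Dom_diag_coords n → Spec_diag_coords n (diag_coords n)

-- ===== LEMMAS AND PROOFS =====

-- the column B assigns to row i
def pvCol (n i : Int) : Int := if n ≤ 2 * 10 - 1 then i + (10 - n) else (n - 2 * 10) - i

lemma alt_eq_filter_map (n : Int) :
    diag_coords_alt n =
      ((PySem.List.pyRange 0 10 1).filter
          (fun i => decide (0 ≤ pvCol n i ∧ pvCol n i < 10))).map
        (fun i => (i, pvCol n i)) := by
  unfold diag_coords_alt
  have h := PySem.List.foldl_append_ite
    (p := fun i : Int => 0 ≤ pvCol n i ∧ pvCol n i < 10)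
    (f := fun i : Int => (i, pvCol n i))
    (l := PySem.List.pyRange 0 10 1) (acc := [])
  simpa [pvCol] using h

lemma alt_nil_of_out (n : Int) (h : n ≤ 0 ∨ 40 ≤ n) : diag_coords_alt n = [] := by
  rw [alt_eq_filter_map]
  have : ((PySem.List.pyRange 0 10 1).filter
      (fun i => decide (0 ≤ pvCol n i ∧ pvCol n i < 10))) = [] := by
    rw [List.filter_eq_nil_iff]
    intro i hi
    rw [PySem.List.mem_pyRange_one] at hi
    simp only [pvCol, decide_eq_true_eq]
    rcases h with h | h <;> split_ifs <;> omega
  rw [this]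
  rfl

lemma a_nil_of_out (n : Int) (h : n ≤ 0 ∨ 40 ≤ n) : diag_coords n = [] := by
  unfold diag_coords
  rcases h with h | h
  · rw [if_pos (by omega)]
    simp only [if_pos (show n ≤ 10 by omega)]
    rw [show (n : Int) - 1 + 1 = n by ring, PySem.List.pyRange_one_eq_nil (by omega)]
    rfl
  · rw [if_neg (by omega)]
    simp only [if_neg (show ¬ n - (2 * 10 - 1) ≤ 10 by omega)]
    rw [PySem.List.pyRange_one_eq_nil (by omega)]
    rfl

-- ===== VERDICT (by name: the statement is the Claim_ definition above) =====
theorem diag_coords_spec : Claim_equal_diag_coords := by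
  intro n _
  show diag_coords n = diag_coords_alt n
  by_cases h1 : n ≤ 0
  · rw [a_nil_of_out n (Or.inl h1), alt_nil_of_out n (Or.inl h1)]
  · by_cases h2 : 40 ≤ n
    · rw [a_nil_of_out n (Or.inr h2), alt_nil_of_out n (Or.inr h2)]
    · have hlo : 1 ≤ n := by omega
      have hhi : n ≤ 39 := by omega
      interval_cases n <;> decide
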